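-- pv_equiv track=rewrite | github.com/hungddoox/project1 | wordle.py | no_letters
-- ===== SOURCE A (Python) =====
-- def no_letters(clues):
--     grey_letters = set()
--     for letters, clue in clues:
--         for i in range(len(letters)):
--             letter = letters[i]
--             if clue[i] == "grey" and letter not in letters[i+1:]:
--                 grey_letters.add(letter)
--     no_letters = sorted(grey_letters)
--     return ''.join(no_letters)
-- ===== SOURCE B (Python) =====
-- def no_letters(clues):
--     grey_letters = set()
--     for letters, clue in clues:
--         seen = set()
--         for i in range(len(letters) - 1, -1, -1):
--             ch = letters[i]
--             if ch not in seen: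
--                 if clue[i] == "grey":
--                     grey_letters.add(ch)
--                 seen.add(ch)
--     return ''.join(sorted(grey_letters))
-- ===== Notes on version B (the rewrite author's own statement) =====
-- stated objective: alternative
-- what changed: Replaces the per-position suffix-slice membership test (letters[i+1:]) with a single reverse pass per word that maintains a 'seen' set, collecting each grey letter at its last occurrence.
import Mathlib
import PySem

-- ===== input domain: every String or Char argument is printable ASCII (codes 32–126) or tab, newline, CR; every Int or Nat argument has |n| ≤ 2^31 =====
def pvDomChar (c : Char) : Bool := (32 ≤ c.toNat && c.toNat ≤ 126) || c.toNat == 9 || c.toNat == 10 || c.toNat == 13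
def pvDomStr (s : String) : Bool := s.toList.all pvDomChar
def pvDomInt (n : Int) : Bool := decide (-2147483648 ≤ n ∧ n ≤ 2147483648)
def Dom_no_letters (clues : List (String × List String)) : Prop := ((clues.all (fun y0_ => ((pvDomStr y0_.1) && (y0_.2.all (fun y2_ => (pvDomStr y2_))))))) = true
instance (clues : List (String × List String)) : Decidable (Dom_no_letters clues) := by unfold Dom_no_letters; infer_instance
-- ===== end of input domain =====

-- B traverses each word once in reverse maintaining a 'seen' set, collecting a grey letter at its
-- last occurrence, instead of A's per-position suffix-slice membership test; the return values are proved equal.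

-- ===== PORT A =====
-- inner loop of A over one (letters, clue) pair: for i in range(len(letters)): …
-- letters[i+1:] is modelled by List.drop (i+1) (exact: the slice start is a nonnegative Nat);
-- clue[i] is clue[i]? — none is exactly where Python raises IndexError (excluded by Pre_).
def aWord (g : PySem.Set Char) (letters : List Char) (clue : List String) : PySem.Set Char :=
  (List.range letters.length).foldl (fun g i =>
    let letter := letters[i]?.getD ' '
    if clue[i]? = some "grey" ∧ letter ∉ letters.drop (i + 1) then g.add letter else g) g


def no_letters (clues : List (String × List String)) : String :=
  let grey := clues.foldl (fun g p => aWord g p.1.toList p.2) PySem.Set.empty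
  String.ofList (PySem.List.sorted grey (fun x => x))

-- ===== PORT B =====
-- body of B's reverse loop at index i; state = (seen, grey_letters)
def bStep (letters : List Char) (clue : List String)
    (st : PySem.Set Char × PySem.Set Char) (i : Nat) : PySem.Set Char × PySem.Set Char :=
  let ch := letters[i]?.getD ' '
  if ch ∈ st.1 then st
  else (st.1.add ch, if clue[i]? = some "grey" then st.2.add ch else st.2)


-- one (letters, clue) pair: for i in range(len(letters)-1, -1, -1) is the fold over (List.range n).reverse
def bWord (g : PySem.Set Char) (letters : List Char) (clue : List String) : PySem.Set Char :=
  (((List.range letters.length).reverse).foldl (bStep letters clue) (PySem.Set.empty, g)).2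


def no_letters_alt (clues : List (String × List String)) : String :=
  let grey := clues.foldl (fun g p => bWord g p.1.toList p.2) PySem.Set.empty
  String.ofList (PySem.List.sorted grey (fun x => x))

-- ===== PRECONDITION & SPEC =====
-- Pre_ excludes exactly the inputs on which the Python A raises IndexError: a pair whose
-- clue list is shorter than its letters string (clue[i] is read for every position i of letters).
def Pre_no_letters (clues : List (String × List String)) : Prop :=
  ∀ p ∈ clues, p.1.toList.length ≤ p.2.length
instance (clues : List (String × List String)) : Decidable (Pre_no_letters clues) := by
  unfold Pre_no_letters; infer_instance

def pvWitness_no_letters : (List (String × List String)) :=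
  [("abba", ["grey", "green", "grey", "grey"]), ("cd", ["yellow", "grey"])]

def Spec_no_letters (clues : List (String × List String)) (out : String) : Prop := out = no_letters_alt clues
instance (clues : List (String × List String)) (out : String) : Decidable (Spec_no_letters clues out) := by unfold Spec_no_letters; infer_instance

-- ===== CLAIM (what is proved, stated in full; the proofs are below) =====
def Claim_equal_no_letters : Prop := ∀ (clues : List (String × List String)), Dom_no_letters clues → Pre_no_letters clues → Spec_no_letters clues (no_letters clues)

-- ===== LEMMAS AND PROOFS =====

-- membership in a suffix, by index

lemma mem_drop_iff (l : List Char) (k : Nat) (x : Char) :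
    x ∈ l.drop k ↔ ∃ j, k ≤ j ∧ l[j]? = some x := by
  rw [List.mem_iff_getElem?]
  constructor
  · rintro ⟨j, hj⟩
    exact ⟨k + j, Nat.le_add_right _ _, by simpa [List.getElem?_drop] using hj⟩
  · rintro ⟨j, hkj, hj⟩
    exact ⟨j - k, by rw [List.getElem?_drop]; rwa [Nat.add_sub_cancel' hkj]⟩

lemma memA_aux (l : List Char) (cl : List String) :
    ∀ n, n ≤ l.length → ∀ (g : PySem.Set Char) (x : Char),
      (x ∈ (List.range n).foldl (fun g i =>
        let letter := l[i]?.getD ' '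
        if cl[i]? = some "grey" ∧ letter ∉ l.drop (i + 1) then g.add letter else g) g) ↔
      x ∈ g ∨ ∃ i < n, l[i]? = some x ∧ x ∉ l.drop (i + 1) ∧ cl[i]? = some "grey" := by
  intro n
  induction n with
  | zero => intro _ g x; simp
  | succ n ih =>
    intro hle g x
    have hn : n < l.length := hle
    have hsome : l[n]? = some l[n] := List.getElem?_eq_getElem hn
    rw [List.range_succ, List.foldl_append, List.foldl_cons, List.foldl_nil]
    simp only [hsome, Option.getD_some]
    split_ifs with hcond
    · rw [PySem.Set.mem_add, ih (le_of_lt hn) g x]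
      constructor
      · rintro (⟨hg | ⟨i, hi, h1, h2, h3⟩⟩ | hx)
        · exact Or.inl hg
        · exact Or.inr ⟨i, Nat.lt_succ_of_lt hi, h1, h2, h3⟩
        · exact Or.inr ⟨n, Nat.lt_succ_self n, hx ▸ hsome, hx ▸ hcond.2, hcond.1⟩
      · rintro (hg | ⟨i, hi, h1, h2, h3⟩)
        · exact Or.inl (Or.inl hg)
        · rcases Nat.lt_succ_iff_lt_or_eq.mp hi with hi' | rfl
          · exact Or.inl (Or.inr ⟨i, hi', h1, h2, h3⟩)
          · exact Or.inr (by cases hsome ▸ h1; rfl)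
    · rw [ih (le_of_lt hn) g x]
      constructor
      · rintro (hg | ⟨i, hi, h1, h2, h3⟩)
        · exact Or.inl hg
        · exact Or.inr ⟨i, Nat.lt_succ_of_lt hi, h1, h2, h3⟩
      · rintro (hg | ⟨i, hi, h1, h2, h3⟩)
        · exact Or.inl hg
        · rcases Nat.lt_succ_iff_lt_or_eq.mp hi with hi' | rfl
          · exact Or.inr ⟨i, hi', h1, h2, h3⟩
          · exact absurd ⟨h3, by cases hsome ▸ h1; exact h2⟩ hcond

lemma memA (g : PySem.Set Char) (l : List Char) (cl : List String) (x : Char) :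
    x ∈ aWord g l cl ↔
      x ∈ g ∨ ∃ i < l.length, l[i]? = some x ∧ x ∉ l.drop (i + 1) ∧ cl[i]? = some "grey" :=
  memA_aux l cl l.length le_rfl g x

lemma memB_aux (l : List Char) (cl : List String) :
    ∀ n, n ≤ l.length → ∀ (s g : PySem.Set Char) (x : Char),
      (x ∈ (((List.range n).reverse).foldl (bStep l cl) (s, g)).1 ↔
        x ∈ s ∨ ∃ i < n, l[i]? = some x) ∧
      (x ∈ (((List.range n).reverse).foldl (bStep l cl) (s, g)).2 ↔
        x ∈ g ∨ ∃ i < n, l[i]? = some x ∧ x ∉ s ∧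
          (∀ j, i < j → j < n → l[j]? ≠ some x) ∧ cl[i]? = some "grey") := by
  intro n
  induction n with
  | zero => intro _ s g x; simp
  | succ n ih =>
    intro hle s g x
    have hn : n < l.length := hle
    have hsome : l[n]? = some l[n] := List.getElem?_eq_getElem hn
    rw [List.range_succ, List.reverse_append, List.reverse_singleton]
    simp only [List.singleton_append, List.foldl_cons]
    by_cases hmem : l[n] ∈ s
    · have hb : bStep l cl (s, g) n = (s, g) := by
        simp [bStep, hsome, hmem]
      rw [hb]
      obtain ⟨ih1, ih2⟩ := ih (le_of_lt hn) s g x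
      refine ⟨ih1.trans ?_, ih2.trans ?_⟩
      · constructor
        · rintro (hs | ⟨i, hi, h1⟩)
          · exact Or.inl hs
          · exact Or.inr ⟨i, Nat.lt_succ_of_lt hi, h1⟩
        · rintro (hs | ⟨i, hi, h1⟩)
          · exact Or.inl hs
          · rcases Nat.lt_succ_iff_lt_or_eq.mp hi with hi' | rfl
            · exact Or.inr ⟨i, hi', h1⟩
            · exact Or.inl (by cases hsome ▸ h1; exact hmem)
      · constructor
        · rintro (hg | ⟨i, hi, h1, h2, h3, h4⟩)
          · exact Or.inl hg
          · refine Or.inr ⟨i, Nat.lt_succ_of_lt hi, h1, h2, ?_, h4⟩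
            intro j hij hj
            rcases Nat.lt_succ_iff_lt_or_eq.mp hj with hj' | rfl
            · exact h3 j hij hj'
            · intro hcon; exact h2 (by cases hsome ▸ hcon; exact hmem)
        · rintro (hg | ⟨i, hi, h1, h2, h3, h4⟩)
          · exact Or.inl hg
          · rcases Nat.lt_succ_iff_lt_or_eq.mp hi with hi' | rfl
            · exact Or.inr ⟨i, hi', h1, h2, fun j hij hj => h3 j hij (Nat.lt_succ_of_lt hj), h4⟩
            · exact absurd (by cases hsome ▸ h1; exact hmem) h2
    · have hb : bStep l cl (s, g) n =
          (s.add l[n], if cl[n]? = some "grey" then g.add l[n] else g) := by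
        simp [bStep, hsome, hmem]
      rw [hb]
      obtain ⟨ih1, ih2⟩ :=
        ih (le_of_lt hn) (s.add l[n]) (if cl[n]? = some "grey" then g.add l[n] else g) x
      refine ⟨ih1.trans ?_, ih2.trans ?_⟩
      · rw [PySem.Set.mem_add]
        constructor
        · rintro ((hs | rfl) | ⟨i, hi, h1⟩)
          · exact Or.inl hs
          · exact Or.inr ⟨n, Nat.lt_succ_self n, hsome⟩
          · exact Or.inr ⟨i, Nat.lt_succ_of_lt hi, h1⟩
        · rintro (hs | ⟨i, hi, h1⟩)
          · exact Or.inl (Or.inl hs)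
          · rcases Nat.lt_succ_iff_lt_or_eq.mp hi with hi' | rfl
            · exact Or.inr ⟨i, hi', h1⟩
            · exact Or.inl (Or.inr (by cases hsome ▸ h1; rfl))
      · constructor
        · rintro (hg | ⟨i, hi, h1, h2, h3, h4⟩)
          · split_ifs at hg with hgrey
            · rcases (PySem.Set.mem_add g l[n] x).mp hg with hg' | rfl
              · exact Or.inl hg'
              · refine Or.inr ⟨n, Nat.lt_succ_self n, hsome, hmem, ?_, hgrey⟩
                intro j h1j h2j; omega
            · exact Or.inl hg
          · rw [PySem.Set.mem_add, not_or] at h2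
            refine Or.inr ⟨i, Nat.lt_succ_of_lt hi, h1, h2.1, ?_, h4⟩
            intro j hij hj
            rcases Nat.lt_succ_iff_lt_or_eq.mp hj with hj' | rfl
            · exact h3 j hij hj'
            · rw [hsome]; intro hcon; exact h2.2 (Option.some_injective _ hcon).symm
        · rintro (hg | ⟨i, hi, h1, h2, h3, h4⟩)
          · refine Or.inl ?_
            split_ifs with hgrey
            · exact (PySem.Set.mem_add g l[n] x).mpr (Or.inl hg)
            · exact hg
          · rcases Nat.lt_succ_iff_lt_or_eq.mp hi with hi' | rfl
            · refine Or.inr ⟨i, hi', h1, ?_, fun j hij hj => h3 j hij (Nat.lt_succ_of_lt hj), h4⟩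
              rw [PySem.Set.mem_add]
              rintro (hs | rfl)
              · exact h2 hs
              · exact (h3 n hi' (Nat.lt_succ_self n)) hsome
            · refine Or.inl ?_
              rw [h4, if_pos rfl]
              exact (PySem.Set.mem_add _ _ _).mpr (Or.inr (Option.some_injective _ (hsome ▸ h1)).symm)

lemma memB (g : PySem.Set Char) (l : List Char) (cl : List String) (x : Char) :
    x ∈ bWord g l cl ↔
      x ∈ g ∨ ∃ i < l.length, l[i]? = some x ∧ x ∉ l.drop (i + 1) ∧ cl[i]? = some "grey" := by
  rw [bWord, ((memB_aux l cl l.length le_rfl PySem.Set.empty g x).2)]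
  refine or_congr (by simp) (exists_congr fun i => ?_)
  refine and_congr_right fun hi => and_congr_right fun h1 => ?_
  rw [mem_drop_iff]
  constructor
  · rintro ⟨-, h3, h4⟩
    exact ⟨fun ⟨j, hj, hjx⟩ => h3 j hj (by
      by_contra hjn
      simp [List.getElem?_eq_none (show l.length ≤ j by omega)] at hjx) hjx, h4⟩
  · rintro ⟨h2, h4⟩
    exact ⟨by simp [PySem.Set.empty], fun j hij hjn hjx => h2 ⟨j, hij, hjx⟩, h4⟩

lemma nodup_empty : (PySem.Set.empty : PySem.Set Char).Nodup := List.nodup_nil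

lemma nodupA_aux (l : List Char) (cl : List String) :
    ∀ (idx : List Nat) (g : PySem.Set Char), g.Nodup →
      (idx.foldl (fun g i =>
        let letter := l[i]?.getD ' '
        if cl[i]? = some "grey" ∧ letter ∉ l.drop (i + 1) then g.add letter else g) g).Nodup := by
  intro idx
  induction idx with
  | nil => intro g h; exact h
  | cons i t ih =>
    intro g h
    rw [List.foldl_cons]
    dsimp only
    split_ifs with hc
    · exact ih _ (PySem.Set.nodup_add g _ h)
    · exact ih _ h

lemma nodupA (g : PySem.Set Char) (l : List Char) (cl : List String) (h : g.Nodup) :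
    (aWord g l cl).Nodup := nodupA_aux l cl _ g h

lemma nodupB_aux (l : List Char) (cl : List String) :
    ∀ (idx : List Nat) (s g : PySem.Set Char), g.Nodup →
      ((idx.foldl (bStep l cl) (s, g)).2).Nodup := by
  intro idx
  induction idx with
  | nil => intro s g h; exact h
  | cons i t ih =>
    intro s g h
    rw [List.foldl_cons]
    simp only [bStep]
    split_ifs with h1 h2
    · exact ih s g h
    · exact ih _ _ (PySem.Set.nodup_add g _ h)
    · exact ih _ _ h

lemma nodupB (g : PySem.Set Char) (l : List Char) (cl : List String) (h : g.Nodup) :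
    (bWord g l cl).Nodup := nodupB_aux l cl _ _ g h

lemma words (clues : List (String × List String)) :
    ∀ (g₁ g₂ : PySem.Set Char), g₁.Nodup → g₂.Nodup → (∀ x, x ∈ g₁ ↔ x ∈ g₂) →
      (clues.foldl (fun g p => aWord g p.1.toList p.2) g₁).Nodup ∧
      (clues.foldl (fun g p => bWord g p.1.toList p.2) g₂).Nodup ∧
      ∀ x, x ∈ clues.foldl (fun g p => aWord g p.1.toList p.2) g₁ ↔
           x ∈ clues.foldl (fun g p => bWord g p.1.toList p.2) g₂ := by
  induction clues with
  | nil => intro g₁ g₂ h₁ h₂ hm; exact ⟨h₁, h₂, hm⟩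
  | cons p t ih =>
    intro g₁ g₂ h₁ h₂ hm
    rw [List.foldl_cons, List.foldl_cons]
    exact ih _ _ (nodupA g₁ _ _ h₁) (nodupB g₂ _ _ h₂)
      (fun x => by rw [memA, memB]; exact or_congr (hm x) Iff.rfl)


-- ===== VERDICT (by name: the statement is the Claim_ definition above) =====
theorem no_letters_spec : Claim_equal_no_letters := by
  intro clues _ _
  unfold Spec_no_letters
  obtain ⟨hA, hB, hm⟩ :=
    words clues PySem.Set.empty PySem.Set.empty nodup_empty nodup_empty (fun _ => Iff.rfl)
  unfold no_letters no_letters_alt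
  exact congrArg String.ofList
    (PySem.List.sorted_eq_sorted_of_perm _ _ _ Function.injective_id
      ((List.perm_ext_iff_of_nodup hA hB).mpr hm))
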